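-- pv_equiv track=rewrite | github.com/DiegoAlb09/Euler2D | generator/topology_codes_extended.py | calcular_N2h_N2v
-- ===== SOURCE A (Python) =====
-- def calcular_N2h_N2v(ot3, ventana=5):
--     """
--     Calcula N2h y N2v como la cantidad de ventanas en las que hay predominancia
--     horizontal (H) o vertical (V) en secuencias de 5 direcciones.
--     """
--     N2h = 0
--     N2v = 0
--     for i in range(len(ot3) - ventana + 1):
--         ventana_actual = ot3[i:i + ventana]
--         h = ventana_actual.count('H')
--         v = ventana_actual.count('V')
--
--         if h >= 3 and h > v:
--             N2h += 1
--         elif v >= 3 and v > h: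
--             N2v += 1
--
--     return N2h, N2v
-- ===== SOURCE B (Python) =====
-- def calcular_N2h_N2v(ot3, ventana=5):
--     """Prefix-sum version: one pass builds cumulative H/V counts, then each
--     window's counts are O(1) differences of two prefix sums."""
--     n = len(ot3)
--     ph = [0]
--     pv = [0]
--     h = 0
--     v = 0
--     for c in ot3:
--         if c == 'H':
--             h += 1
--         elif c == 'V':
--             v += 1
--         ph.append(h)
--         pv.append(v)
--
--     N2h = 0
--     N2v = 0
--     for i in range(n - ventana + 1):
--         h = ph[i + ventana] - ph[i]
--         v = pv[i + ventana] - pv[i]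
--         if h >= 3 and h > v:
--             N2h += 1
--         elif v >= 3 and v > h:
--             N2v += 1
--     return N2h, N2v
-- ===== Notes on version B (the rewrite author's own statement) =====
-- stated objective: faster
-- what changed: B builds cumulative H/V prefix counts in one pass and obtains each window's counts as an O(1) difference of two prefix sums instead of slicing and recounting every window; Pre_ excludes negative window sizes, where A's value comes from Python's negative slice-bound wraparound and B's natural indexing raises.
-- outside the precondition, e.g. on calcular_N2h_N2v('HHHH', -1): A returns (1, 0), B raises IndexError
import Mathlib
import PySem

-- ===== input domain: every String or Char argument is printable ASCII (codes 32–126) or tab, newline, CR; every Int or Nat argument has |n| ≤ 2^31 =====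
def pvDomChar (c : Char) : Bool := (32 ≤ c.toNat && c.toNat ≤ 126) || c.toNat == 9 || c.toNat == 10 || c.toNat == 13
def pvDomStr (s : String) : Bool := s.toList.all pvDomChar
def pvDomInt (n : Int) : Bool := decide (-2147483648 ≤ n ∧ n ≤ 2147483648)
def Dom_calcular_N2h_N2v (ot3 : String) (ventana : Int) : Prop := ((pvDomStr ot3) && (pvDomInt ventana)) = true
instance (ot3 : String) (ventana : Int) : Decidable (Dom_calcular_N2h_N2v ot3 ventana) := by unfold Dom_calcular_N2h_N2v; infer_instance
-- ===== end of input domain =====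

-- B replaces A's per-window slice-and-recount by one prefix-sum pass with O(1) window counts (objective: faster).
-- Python A returns a tuple (N2h, N2v); per the type convention both ports return the list [N2h, N2v].

-- ===== PORT A =====
def calcular_N2h_N2v (ot3 : String) (ventana : Int) : List Int :=
  let res := (PySem.List.pyRange 0 (PySem.Str.len ot3 - ventana + 1) 1).foldl
    (fun (st : Int × Int) i =>
      let ventana_actual := PySem.Str.slice ot3 (some i) (some (i + ventana))
      let h := PySem.Str.count ventana_actual "H"
      let v := PySem.Str.count ventana_actual "V"
      if 3 ≤ h ∧ v < h then (st.1 + 1, st.2)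
      else if 3 ≤ v ∧ h < v then (st.1, st.2 + 1)
      else st) (0, 0)
  [res.1, res.2]

-- ===== PORT B =====
def calcular_N2h_N2v_alt (ot3 : String) (ventana : Int) : List Int :=
  let cs := ot3.toList
  let n := cs.length
  let built := cs.foldl
    (fun (st : List Int × List Int × Int × Int) c =>
      let hv := if c == 'H' then (st.2.2.1 + 1, st.2.2.2)
                else if c == 'V' then (st.2.2.1, st.2.2.2 + 1)
                else (st.2.2.1, st.2.2.2)
      (st.1 ++ [hv.1], st.2.1 ++ [hv.2], hv.1, hv.2)) ([0], [0], 0, 0)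
  let ph := built.1
  let pv := built.2.1
  let res := (PySem.List.pyRange 0 ((n : Int) - ventana + 1) 1).foldl
    (fun (st : Int × Int) i =>
      -- ph[i + ventana] etc.; under Pre_ the indices are always in range, so the default 0 is never used
      let h := PySem.List.pyGetD ph (i + ventana) 0 - PySem.List.pyGetD ph i 0
      let v := PySem.List.pyGetD pv (i + ventana) 0 - PySem.List.pyGetD pv i 0
      if 3 ≤ h ∧ v < h then (st.1 + 1, st.2)
      else if 3 ≤ v ∧ h < v then (st.1, st.2 + 1)
      else st) (0, 0)
  [res.1, res.2]

-- ===== PRECONDITION & SPEC =====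
-- Pre_ excludes negative window sizes (A still returns there, but only via Python's negative
-- slice-bound wraparound — an accidental corner no caller of a window counter uses — and B's
-- natural prefix-sum indexing raises IndexError there).
def Pre_calcular_N2h_N2v (ot3 : String) (ventana : Int) : Prop := 0 ≤ ventana
instance (ot3 : String) (ventana : Int) : Decidable (Pre_calcular_N2h_N2v ot3 ventana) := by unfold Pre_calcular_N2h_N2v; infer_instance
def pvWitness_calcular_N2h_N2v : String × Int := ("HHHVVHVH", 5)

def Spec_calcular_N2h_N2v (ot3 : String) (ventana : Int) (out : List Int) : Prop := out = calcular_N2h_N2v_alt ot3 ventana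
instance (ot3 : String) (ventana : Int) (out : List Int) : Decidable (Spec_calcular_N2h_N2v ot3 ventana out) := by unfold Spec_calcular_N2h_N2v; infer_instance

-- ===== CLAIM (what is proved, stated in full; the proofs are below) =====
def Claim_equal_calcular_N2h_N2v : Prop := ∀ (ot3 : String) (ventana : Int), Dom_calcular_N2h_N2v ot3 ventana → Pre_calcular_N2h_N2v ot3 ventana → Spec_calcular_N2h_N2v ot3 ventana (calcular_N2h_N2v ot3 ventana)

-- ===== LEMMAS AND PROOFS =====

-- prefix count (as Int) of character c among the first k characters
def pvP (c : Char) (cs : List Char) (k : Nat) : Int := ((cs.take k).count c : Int)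

-- the ideal state of B's first loop after consuming p
def pvS (p : List Char) : List Int × List Int × Int × Int :=
  ((List.range (p.length + 1)).map (pvP 'H' p),
   (List.range (p.length + 1)).map (pvP 'V' p),
   (p.count 'H' : Int), (p.count 'V' : Int))

lemma pv_count_go (c : Char) : ∀ (fuel : Nat) (s : List Char) (acc : Nat),
    s.length ≤ fuel → PySem.Chars.count.go [c] fuel s acc = acc + s.count c := by
  intro fuel
  induction fuel with
  | zero =>
    intro s acc h
    have : s = [] := List.eq_nil_of_length_eq_zero (Nat.le_zero.mp h)
    subst this
    simp [PySem.Chars.count.go]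
  | succ f ih =>
    intro s acc h
    cases s with
    | nil => simp [PySem.Chars.count.go]
    | cons x t =>
      rw [PySem.Chars.count.go]
      simp only [List.length_cons] at h
      by_cases hx : c = x
      · subst hx
        simp only [List.isPrefixOf, Bool.and_true, beq_self_eq_true, if_pos]
        rw [ih _ _ (by simpa using Nat.le_of_succ_le_succ h)]
        simp
        omega
      · have hp : ([c].isPrefixOf (x :: t)) = false := by
          simp [List.isPrefixOf, hx]
        rw [hp]
        simp only [Bool.false_eq_true, if_false]
        rw [ih _ _ (Nat.le_of_succ_le_succ h)]
        simp [Ne.symm hx]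

lemma pv_count_single (s : List Char) (c : Char) : PySem.Chars.count s [c] = s.count c := by
  rw [PySem.Chars.count]
  simp [List.isEmpty]
  simpa using pv_count_go c s.length s 0 le_rfl

lemma pv_clamp_of (n : Nat) (j : Int) (h0 : 0 ≤ j) (hn : j ≤ (n : Int)) :
    PySem.List.clampIdx n j = j.toNat := by
  simp only [PySem.List.clampIdx]
  split_ifs <;> omega

lemma pv_getD (c : Char) (cs : List Char) (j : Nat) (hj : j ≤ cs.length) :
    PySem.List.pyGetD ((List.range (cs.length + 1)).map (pvP c cs)) (j : Int) 0 = pvP c cs j := by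
  rw [PySem.List.pyGetD_natCast]
  exact PySem.List.getD_map_range _ _ _ _ (by omega)

lemma pv_count_slice (c : Char) (cs : List Char) (i t : Int) :
    ((PySem.List.slice cs (some i) (some t)).count c : Int)
      = pvP c cs (PySem.List.clampIdx cs.length i
                    + (PySem.List.clampIdx cs.length t - PySem.List.clampIdx cs.length i))
        - pvP c cs (PySem.List.clampIdx cs.length i) := by
  simp only [PySem.List.slice, pvP]
  set a := PySem.List.clampIdx cs.length i
  set b := PySem.List.clampIdx cs.length t
  have h1 : cs.take (a + (b - a)) = cs.take a ++ (cs.drop a).take (b - a) := List.take_add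
  have h2 : (cs.take (a + (b - a))).count c
      = (cs.take a).count c + ((cs.drop a).take (b - a)).count c := by
    rw [h1, List.count_append]
  push_cast [h2]
  ring

lemma pvS_map_snoc (d : Char) (p : List Char) (x : Char) :
    (List.range ((p ++ [x]).length + 1)).map (pvP d (p ++ [x]))
      = (List.range (p.length + 1)).map (pvP d p) ++ [((p ++ [x]).count d : Int)] := by
  rw [List.length_append, List.length_singleton]
  rw [show p.length + 1 + 1 = (p.length + 1) + 1 from rfl, List.range_succ]
  rw [List.map_append]
  congr 1
  · apply List.map_congr_left
    intro k hk
    simp only [List.mem_range] at hk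
    simp only [pvP]
    rw [List.take_append_of_le_length (by omega)]
  · simp [pvP, List.take_of_length_le]

lemma pv_build (suf : List Char) : ∀ (pre : List Char),
    suf.foldl
      (fun (st : List Int × List Int × Int × Int) c =>
        let hv := if c == 'H' then (st.2.2.1 + 1, st.2.2.2)
                  else if c == 'V' then (st.2.2.1, st.2.2.2 + 1)
                  else (st.2.2.1, st.2.2.2)
        (st.1 ++ [hv.1], st.2.1 ++ [hv.2], hv.1, hv.2)) (pvS pre) = pvS (pre ++ suf) := by
  induction suf with
  | nil => intro pre; simp
  | cons x t ih =>
    intro pre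
    rw [List.foldl_cons]
    have hstep :
        (let hv := if x == 'H' then ((pvS pre).2.2.1 + 1, (pvS pre).2.2.2)
                   else if x == 'V' then ((pvS pre).2.2.1, (pvS pre).2.2.2 + 1)
                   else ((pvS pre).2.2.1, (pvS pre).2.2.2)
         ((pvS pre).1 ++ [hv.1], (pvS pre).2.1 ++ [hv.2], hv.1, hv.2)) = pvS (pre ++ [x]) := by
      have hH : (if x == 'H' then ((pre.count 'H' : Int) + 1, (pre.count 'V' : Int))
                 else if x == 'V' then ((pre.count 'H' : Int), (pre.count 'V' : Int) + 1)
                 else ((pre.count 'H' : Int), (pre.count 'V' : Int)))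
          = (((pre ++ [x]).count 'H' : Int), ((pre ++ [x]).count 'V' : Int)) := by
        by_cases h1 : x = 'H'
        · subst h1; simp [List.count_append]
        · by_cases h2 : x = 'V'
          · subst h2; simp [List.count_append]
          · simp [h1, h2, List.count_append]
      show ((pvS pre).1 ++ _, (pvS pre).2.1 ++ _, _) = _
      simp only [pvS] at hH ⊢
      rw [show (if x == 'H' then ((pre.count 'H' : Int) + 1, (pre.count 'V' : Int))
                 else if x == 'V' then ((pre.count 'H' : Int), (pre.count 'V' : Int) + 1)
                 else ((pre.count 'H' : Int), (pre.count 'V' : Int)))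
          = (((pre ++ [x]).count 'H' : Int), ((pre ++ [x]).count 'V' : Int)) from hH]
      refine Prod.ext ?_ (Prod.ext ?_ rfl)
      · simpa using (pvS_map_snoc 'H' pre x).symm
      · simpa using (pvS_map_snoc 'V' pre x).symm
    rw [hstep, ih (pre ++ [x])]
    simp

-- one in-range window: A's slice-and-count step equals B's prefix-sum step
lemma pv_step_eq (cs : List Char) (ventana i : Int) (st : Int × Int)
    (hv0 : 0 ≤ ventana) (hi0 : 0 ≤ i) (hin : i + ventana ≤ (cs.length : Int)) :
    (let w := PySem.List.slice cs (some i) (some (i + ventana))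
     let h := w.count 'H'
     let v := w.count 'V'
     if 3 ≤ h ∧ v < h then (st.1 + 1, st.2)
     else if 3 ≤ v ∧ h < v then (st.1, st.2 + 1)
     else st)
    = (let h := PySem.List.pyGetD ((List.range (cs.length + 1)).map (pvP 'H' cs)) (i + ventana) 0
                  - PySem.List.pyGetD ((List.range (cs.length + 1)).map (pvP 'H' cs)) i 0
       let v := PySem.List.pyGetD ((List.range (cs.length + 1)).map (pvP 'V' cs)) (i + ventana) 0
                  - PySem.List.pyGetD ((List.range (cs.length + 1)).map (pvP 'V' cs)) i 0
       if 3 ≤ h ∧ v < h then (st.1 + 1, st.2)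
       else if 3 ≤ v ∧ h < v then (st.1, st.2 + 1)
       else st) := by
  have hca : PySem.List.clampIdx cs.length i = i.toNat := pv_clamp_of _ _ hi0 (by omega)
  have hcb : PySem.List.clampIdx cs.length (i + ventana) = (i + ventana).toNat :=
    pv_clamp_of _ _ (by omega) hin
  have hia : (i.toNat : Int) = i := by omega
  have hib : ((i + ventana).toNat : Int) = i + ventana := by omega
  have hab : i.toNat ≤ (i + ventana).toNat := by omega
  have hH := pv_count_slice 'H' cs i (i + ventana)
  have hV := pv_count_slice 'V' cs i (i + ventana)
  rw [hca, hcb, show i.toNat + ((i + ventana).toNat - i.toNat) = (i + ventana).toNat from by omega]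
    at hH hV
  have gHa : PySem.List.pyGetD ((List.range (cs.length + 1)).map (pvP 'H' cs)) i 0
      = pvP 'H' cs i.toNat := by rw [← hia]; exact pv_getD 'H' cs _ (by omega)
  have gHb : PySem.List.pyGetD ((List.range (cs.length + 1)).map (pvP 'H' cs)) (i + ventana) 0
      = pvP 'H' cs (i + ventana).toNat := by rw [← hib]; exact pv_getD 'H' cs _ (by omega)
  have gVa : PySem.List.pyGetD ((List.range (cs.length + 1)).map (pvP 'V' cs)) i 0
      = pvP 'V' cs i.toNat := by rw [← hia]; exact pv_getD 'V' cs _ (by omega)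
  have gVb : PySem.List.pyGetD ((List.range (cs.length + 1)).map (pvP 'V' cs)) (i + ventana) 0
      = pvP 'V' cs (i + ventana).toNat := by rw [← hib]; exact pv_getD 'V' cs _ (by omega)
  simp only [gHa, gHb, gVa, gVb]
  have c1 : (3 ≤ (PySem.List.slice cs (some i) (some (i + ventana))).count 'H'
              ∧ (PySem.List.slice cs (some i) (some (i + ventana))).count 'V'
                  < (PySem.List.slice cs (some i) (some (i + ventana))).count 'H')
      ↔ (3 ≤ pvP 'H' cs (i + ventana).toNat - pvP 'H' cs i.toNat
          ∧ pvP 'V' cs (i + ventana).toNat - pvP 'V' cs i.toNat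
              < pvP 'H' cs (i + ventana).toNat - pvP 'H' cs i.toNat) := by
    constructor <;> intro hc <;> constructor <;> omega
  have c2 : (3 ≤ (PySem.List.slice cs (some i) (some (i + ventana))).count 'V'
              ∧ (PySem.List.slice cs (some i) (some (i + ventana))).count 'H'
                  < (PySem.List.slice cs (some i) (some (i + ventana))).count 'V')
      ↔ (3 ≤ pvP 'V' cs (i + ventana).toNat - pvP 'V' cs i.toNat
          ∧ pvP 'H' cs (i + ventana).toNat - pvP 'H' cs i.toNat
              < pvP 'V' cs (i + ventana).toNat - pvP 'V' cs i.toNat) := by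
    constructor <;> intro hc <;> constructor <;> omega
  simp only [c1, c2]

-- ===== VERDICT (by name: the statement is the Claim_ definition above) =====
theorem calcular_N2h_N2v_spec : Claim_equal_calcular_N2h_N2v := by
  intro ot3 ventana _ hpre
  unfold Spec_calcular_N2h_N2v
  simp only [calcular_N2h_N2v, calcular_N2h_N2v_alt]
  have hbuild : ot3.toList.foldl
      (fun (st : List Int × List Int × Int × Int) c =>
        let hv := if c == 'H' then (st.2.2.1 + 1, st.2.2.2)
                  else if c == 'V' then (st.2.2.1, st.2.2.2 + 1)
                  else (st.2.2.1, st.2.2.2)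
        (st.1 ++ [hv.1], st.2.1 ++ [hv.2], hv.1, hv.2)) ([0], [0], 0, 0) = pvS ot3.toList := by
    have h0 : (([0], [0], 0, 0) : List Int × List Int × Int × Int) = pvS [] := by
      simp [pvS, pvP]
    rw [h0]
    simpa using pv_build ot3.toList []
  rw [hbuild, PySem.Str.len_eq ot3]
  refine congrArg (fun r : Int × Int => ([r.1, r.2] : List Int)) ?_
  apply PySem.List.foldl_congr_mem
  intro acc x hx
  rw [PySem.List.mem_pyRange_one] at hx
  have hstep := pv_step_eq ot3.toList ventana x acc hpre hx.1 (by omega)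
  simpa [pv_count_single, pvS] using hstep
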